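-- pv_equiv track=rewrite | github.com/sujitnoronha/audio_reasoning_interspeech | src/check_invalid_predictions.py | check_prediction_in_choices
-- ===== SOURCE A (Python) =====
-- from typing import Dict, List, Optional, Tuple
--
-- def normalize_for_comparison(text: str) -> str:
--     """Normalize text for comparison (lowercase, strip whitespace)."""
--     return text.lower().strip()
--
-- def check_prediction_in_choices(
--     prediction: str,
--     choices: List[str],
--     ground_truth_answer: str
-- ) -> Tuple[bool, Optional[str]]:
--     """
--     Check if prediction matches any of the valid choices.
--
--     Returns:
--         Tuple of (is_valid, matched_choice or None)
--     """
--     if not prediction: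
--         return False, None
--
--     pred_norm = normalize_for_comparison(prediction)
--
--     # Check exact match with choices
--     for choice in choices:
--         choice_norm = normalize_for_comparison(choice)
--         if pred_norm == choice_norm:
--             return True, choice
--
--     # Check if prediction contains choice or vice versa
--     for choice in choices:
--         choice_norm = normalize_for_comparison(choice)
--         # Exact substring match for shorter strings
--         if len(pred_norm) >= 2 and len(choice_norm) >= 2:
--             if pred_norm in choice_norm or choice_norm in pred_norm:
--                 return True, choice
--
--     # Check if prediction matches ground truth answer (might be formatted differently)
--     gt_norm = normalize_for_comparison(ground_truth_answer)
--     if pred_norm == gt_norm: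
--         return True, ground_truth_answer
--
--     return False, None
-- ===== SOURCE B (Python) =====
-- from typing import Dict, List, Optional, Tuple
--
-- def normalize_for_comparison(text: str) -> str:
--     return text.lower().strip()
--
-- def check_prediction_in_choices(
--     prediction: str,
--     choices: List[str],
--     ground_truth_answer: str
-- ) -> Tuple[bool, Optional[str]]:
--     if not prediction:
--         return False, None
--
--     pred_norm = normalize_for_comparison(prediction)
--
--     # one full pass with two accumulators: the first exact match and the first
--     # substring-style candidate; the exact match, wherever it occurs, wins
--     exact = None
--     cand = None
--     for choice in choices:
--         choice_norm = normalize_for_comparison(choice)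
--         if exact is None and pred_norm == choice_norm:
--             exact = choice
--         if cand is None and len(pred_norm) >= 2 and len(choice_norm) >= 2 \
--            and (pred_norm in choice_norm or choice_norm in pred_norm):
--             cand = choice
--
--     if exact is not None:
--         return True, exact
--     if cand is not None:
--         return True, cand
--     if pred_norm == normalize_for_comparison(ground_truth_answer):
--         return True, ground_truth_answer
--     return False, None
-- ===== Notes on version B (the rewrite author's own statement) =====
-- stated objective: alternative
-- what changed: A's two sequential early-returning scans over choices are replaced by one exhaustive fold that normalizes each choice once and carries two accumulators (first exact match, first substring candidate), resolved after the loop.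
import Mathlib
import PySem

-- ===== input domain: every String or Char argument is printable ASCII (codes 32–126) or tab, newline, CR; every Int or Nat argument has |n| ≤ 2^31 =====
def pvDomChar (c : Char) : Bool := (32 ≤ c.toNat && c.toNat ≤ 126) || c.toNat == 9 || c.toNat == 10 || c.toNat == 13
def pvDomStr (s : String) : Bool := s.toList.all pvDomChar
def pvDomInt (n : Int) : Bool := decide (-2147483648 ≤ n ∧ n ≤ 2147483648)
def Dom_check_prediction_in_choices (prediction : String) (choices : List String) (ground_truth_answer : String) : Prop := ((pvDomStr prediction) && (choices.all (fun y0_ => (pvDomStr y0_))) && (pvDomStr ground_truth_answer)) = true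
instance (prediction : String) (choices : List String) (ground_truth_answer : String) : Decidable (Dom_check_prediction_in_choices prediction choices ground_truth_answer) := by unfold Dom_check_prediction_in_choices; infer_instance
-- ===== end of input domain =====

-- B replaces A's two sequential early-returning scans by one exhaustive fold
-- carrying two accumulators (first exact match, first substring candidate),
-- resolved after the loop (objective: alternative decomposition, same cost).

-- ===== PORT A =====
def pvNorm (t : String) : String := PySem.Str.strip (PySem.Str.lower t)

-- first loop of A: exact normalized match, early return
def pvLoop1 (pn : String) : List String → Option String
  | [] => none
  | c :: cs => if pn = pvNorm c then some c else pvLoop1 pn cs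

-- second loop of A: bidirectional substring match with the len>=2 guard
def pvLoop2 (pn : String) : List String → Option String
  | [] => none
  | c :: cs =>
    let cn := pvNorm c
    if 2 ≤ PySem.Str.len pn ∧ 2 ≤ PySem.Str.len cn then
      if (PySem.Str.isIn pn cn || PySem.Str.isIn cn pn) = true then some c
      else pvLoop2 pn cs
    else pvLoop2 pn cs

def check_prediction_in_choices (prediction : String) (choices : List String) (ground_truth_answer : String) : Bool × Option String :=
  if prediction = "" then (false, none)
  else
    let pred_norm := pvNorm prediction
    match pvLoop1 pred_norm choices with
    | some c => (true, some c)
    | none =>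
      match pvLoop2 pred_norm choices with
      | some c => (true, some c)
      | none =>
        let gt_norm := pvNorm ground_truth_answer
        if pred_norm = gt_norm then (true, some ground_truth_answer)
        else (false, none)

-- ===== PORT B =====
-- B's loop body: update the two accumulators (exact, cand) with one choice
def pvStepB (pn : String) (acc : Option String × Option String) (choice : String) : Option String × Option String :=
  let cn := pvNorm choice
  (if acc.1 = none ∧ pn = cn then some choice else acc.1,
   if acc.2 = none ∧ 2 ≤ PySem.Str.len pn ∧ 2 ≤ PySem.Str.len cn ∧
      (PySem.Str.isIn pn cn || PySem.Str.isIn cn pn) = true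
   then some choice else acc.2)

def check_prediction_in_choices_alt (prediction : String) (choices : List String) (ground_truth_answer : String) : Bool × Option String :=
  if prediction = "" then (false, none)
  else
    let pn := pvNorm prediction
    let acc := choices.foldl (pvStepB pn) (none, none)
    match acc.1, acc.2 with
    | some e, _ => (true, some e)
    | none, some c => (true, some c)
    | none, none =>
      if pn = pvNorm ground_truth_answer then (true, some ground_truth_answer)
      else (false, none)

-- ===== PRECONDITION & SPEC =====
def Spec_check_prediction_in_choices (prediction : String) (choices : List String) (ground_truth_answer : String) (out : Bool × Option String) : Prop := out = check_prediction_in_choices_alt prediction choices ground_truth_answer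
instance (prediction : String) (choices : List String) (ground_truth_answer : String) (out : Bool × Option String) : Decidable (Spec_check_prediction_in_choices prediction choices ground_truth_answer out) := by unfold Spec_check_prediction_in_choices; infer_instance

-- ===== CLAIM (what is proved, stated in full; the proofs are below) =====
def Claim_equal_check_prediction_in_choices : Prop := ∀ (prediction : String) (choices : List String) (ground_truth_answer : String), Dom_check_prediction_in_choices prediction choices ground_truth_answer → Spec_check_prediction_in_choices prediction choices ground_truth_answer (check_prediction_in_choices prediction choices ground_truth_answer)

-- ===== LEMMAS AND PROOFS =====
-- the fold computes A's two loops, each accumulator keeping its first hit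
lemma pvFoldB_eq (pn : String) (cs : List String) (eo co : Option String) :
    cs.foldl (pvStepB pn) (eo, co) =
      ((match eo with | some x => some x | none => pvLoop1 pn cs),
       (match co with | some x => some x | none => pvLoop2 pn cs)) := by
  induction cs generalizing eo co with
  | nil => cases eo <;> cases co <;> rfl
  | cons c cs ih =>
    simp only [List.foldl, pvStepB, pvLoop1, pvLoop2, ih]
    congr 1
    · cases eo with
      | some x => rfl
      | none =>
        by_cases hx : pn = pvNorm c
        · rw [if_pos ⟨rfl, hx⟩, if_pos hx]
        · rw [if_neg (fun h => hx h.2), if_neg hx]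
    · cases co with
      | some x => rfl
      | none =>
        by_cases hg : 2 ≤ PySem.Str.len pn ∧ 2 ≤ PySem.Str.len (pvNorm c)
        · by_cases hin : (PySem.Str.isIn pn (pvNorm c) || PySem.Str.isIn (pvNorm c) pn) = true
          · rw [if_pos ⟨rfl, hg.1, hg.2, hin⟩]
            simp only [if_pos hg, if_pos hin]
          · rw [if_neg (fun h => hin h.2.2.2)]
            simp only [if_pos hg, if_neg hin]
        · rw [if_neg (fun h => hg ⟨h.2.1, h.2.2.1⟩), if_neg hg]

-- ===== VERDICT (by name: the statement is the Claim_ definition above) =====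
theorem check_prediction_in_choices_spec : Claim_equal_check_prediction_in_choices := by
  intro prediction choices ground_truth_answer _
  unfold Spec_check_prediction_in_choices
  unfold check_prediction_in_choices check_prediction_in_choices_alt
  by_cases hp : prediction = ""
  · simp [hp]
  · simp only [if_neg hp, pvFoldB_eq]
    cases pvLoop1 (pvNorm prediction) choices with
    | some c => rfl
    | none =>
      cases pvLoop2 (pvNorm prediction) choices with
      | some c => rfl
      | none => rfl
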